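-- pv_equiv track=rewrite | github.com/Eugleo/dibby | src/model/precursor.py | _gen_bonds
-- ===== SOURCE A (Python) =====
-- from typing import List, Tuple
--
-- def _gen_bonds(cysteines: Tuple[Tuple[int, int], ...], bonds: int, segments: int):
--     result = []
--
--     def go(
--         cysteines_left: Tuple[Tuple[int, int], ...],
--         bonds_left: int,
--         segment_connections: Tuple[Tuple[int, int], ...],
--         current_bonds: Tuple[Tuple[int, int], ...],
--     ):
--         if bonds_left == 0 and len(segment_connections) == segments:
--             result.append(current_bonds)
--             return
--
--         if bonds_left == 0 or len(cysteines_left) == 0: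
--             return
--
--         current_cys, current_seg = cysteines_left[0]
--         others = cysteines_left[1:]
--
--         # This Cys isn't in a bond
--         go(others, bonds_left, segment_connections, current_bonds)
--
--         # This Cys is in a bond
--         for i, (next_cys, next_seg) in enumerate(others):
--             if next_seg != current_seg:
--                 next_seg_connections = segment_connections + (
--                     (current_seg, next_seg),
--                 )
--             else:
--                 next_seg_connections = segment_connections
--
--             go(
--                 others[:i] + others[i + 1 :],
--                 bonds_left - 1,
--                 next_seg_connections,
--                 current_bonds + ((current_cys, next_cys),),
--             )
--
--     go(
--         cysteines_left=cysteines,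
--         bonds_left=bonds,
--         segment_connections=(),
--         current_bonds=(),
--     )
--
--     return result
-- ===== SOURCE B (Python) =====
-- # B: iterative depth-first enumeration with an explicit stack of frames; carries
-- # only the COUNT of cross-segment connections and prunes infeasible frames.
-- def _gen_bonds(cysteines, bonds, segments):
--     result = []
--     stack = [(tuple(cysteines), bonds, 0, ())]
--     while stack:
--         cys, b, cnt, cb = stack.pop()
--         if cnt > segments or cnt + b < segments or 2 * b > len(cys):
--             continue
--         if b == 0:
--             result.append(cb)
--             continue
--         (c, s), others = cys[0], cys[1:]
--         children = [(others, b, cnt, cb)]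
--         for i, (nc, ns) in enumerate(others):
--             children.append(
--                 (
--                     others[:i] + others[i + 1 :],
--                     b - 1,
--                     cnt + (1 if ns != s else 0),
--                     cb + ((c, nc),),
--                 )
--             )
--         stack.extend(reversed(children))
--     return result
-- ===== Notes on version B (the rewrite author's own statement) =====
-- stated objective: alternative
-- what changed: B replaces A's nested recursive closure mutating a shared result list with a single iterative while loop over an explicit stack of frames, carries only the integer count of cross-segment connections instead of A's accumulated tuple of connection pairs, and prunes a frame on pop as soon as the count exceeds the target, the remaining bonds cannot reach the target, or too few cysteines remain; the emitted list and its order are unchanged (intended as faster via pruning; …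
import Mathlib
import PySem

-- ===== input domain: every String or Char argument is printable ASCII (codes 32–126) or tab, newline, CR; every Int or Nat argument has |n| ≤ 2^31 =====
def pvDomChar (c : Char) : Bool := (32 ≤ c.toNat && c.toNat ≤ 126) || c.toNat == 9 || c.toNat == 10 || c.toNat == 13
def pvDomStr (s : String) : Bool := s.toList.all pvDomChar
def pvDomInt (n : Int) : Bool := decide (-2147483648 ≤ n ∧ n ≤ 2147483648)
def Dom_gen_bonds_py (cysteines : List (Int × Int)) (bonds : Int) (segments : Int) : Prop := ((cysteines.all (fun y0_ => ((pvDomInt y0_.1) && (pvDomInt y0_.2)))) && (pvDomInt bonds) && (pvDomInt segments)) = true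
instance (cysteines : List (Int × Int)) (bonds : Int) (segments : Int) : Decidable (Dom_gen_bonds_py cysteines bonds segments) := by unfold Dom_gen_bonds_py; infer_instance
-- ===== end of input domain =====

-- B replaces A's nested recursive closure by one iterative while loop over an explicit
-- stack of frames, carries only the COUNT of cross-segment connections, and prunes
-- infeasible frames on pop; same output list, same order (alternative decomposition).

-- ===== PORT A =====
-- inner `go` of A; the mutated `result` becomes the returned list in DFS order.
-- The recursion is driven by a Nat fuel equal to the call's termination measure
-- 2*bonds_left.toNat + len(cysteines_left), which strictly decreases at every
-- recursive call, so the fuel never runs out (the fuel-0 branch is dead code).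
-- Python's `enumerate(others)` is ported with Nat indices (List.zipIdx pairs (element, index));
-- `others[:i] + others[i+1:]` is `others.take i ++ others.drop (i+1)`, exact since 0 ≤ i.
def goA (segments : Int) : Nat → List (Int × Int) → Int →
    List (Int × Int) → List (Int × Int) → List (List (Int × Int))
  | fuel, cys, b, sc, cb =>
    if b = 0 ∧ (sc.length : Int) = segments then [cb]
    else if b = 0 ∨ cys.length = 0 then []
    else
      match fuel, cys with
      | _, [] => []  -- unreachable: cys.length ≠ 0
      | 0, _ :: _ => []  -- unreachable: fuel ≥ measure > 0 here
      | fuel + 1, (c, s) :: others =>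
        -- this Cys isn't in a bond
        goA segments fuel others b sc cb ++
        -- this Cys is in a bond
        others.zipIdx.flatMap (fun p =>
          goA segments fuel (others.take p.2 ++ others.drop (p.2 + 1)) (b - 1)
            (if p.1.2 ≠ s then sc ++ [(s, p.1.2)] else sc)
            (cb ++ [(c, p.1.1)]))

def gen_bonds_py (cysteines : List (Int × Int)) (bonds : Int) (segments : Int) : List (List (Int × Int)) :=
  goA segments (2 * bonds.toNat + cysteines.length) cysteines bonds [] []

-- ===== PORT B =====
-- termination fuel for B's while loop: F m bounds the number of loop iterations a
-- frame of measure m can generate (F 0 = 1, F (m+1) = 1 + (m+1) * F m); it is only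
-- a fuel, every popped frame is in fact covered (proved below).
def fuelF : Nat → Nat
  | 0 => 1
  | m + 1 => 1 + (m + 1) * fuelF m

-- B's while loop: the Python stack is popped from the END and extended with
-- reversed(children), so children[0] is processed first; modelling the stack with
-- its TOP at the head, that is exactly `children ++ rest`.  Python's
-- `result.append(cb)` is rendered the standard Lean way: cons onto a reversed
-- accumulator, reversed once at return.
def runB (segments : Int) : Nat → List ((List (Int × Int)) × Int × Int × List (Int × Int)) →
    List (List (Int × Int)) → List (List (Int × Int))
  | _, [], racc => racc
  | 0, _ :: _, racc => racc  -- unreachable: the initial fuel covers every popped frame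
  | fuel + 1, (cys, b, cnt, cb) :: rest, racc =>
    if cnt > segments ∨ cnt + b < segments ∨ 2 * b > (cys.length : Int) then
      runB segments fuel rest racc
    else if b = 0 then runB segments fuel rest (cb :: racc)
    else
      match cys with
      | [] => racc  -- unreachable: guards give 2*b ≤ len and b ≥ 1
      | (c, s) :: others =>
        runB segments fuel
          (((others, b, cnt, cb) ::
            others.zipIdx.map (fun p =>
              (others.take p.2 ++ others.drop (p.2 + 1), b - 1,
               cnt + (if p.1.2 ≠ s then 1 else 0), cb ++ [(c, p.1.1)]))) ++ rest)
          racc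

def gen_bonds_py_alt (cysteines : List (Int × Int)) (bonds : Int) (segments : Int) : List (List (Int × Int)) :=
  (runB segments (fuelF (2 * min bonds.toNat cysteines.length + cysteines.length))
    [(cysteines, bonds, 0, [])] []).reverse

-- ===== PRECONDITION & SPEC =====
def Spec_gen_bonds_py (cysteines : List (Int × Int)) (bonds : Int) (segments : Int) (out : List (List (Int × Int))) : Prop := out = gen_bonds_py_alt cysteines bonds segments
instance (cysteines : List (Int × Int)) (bonds : Int) (segments : Int) (out : List (List (Int × Int))) : Decidable (Spec_gen_bonds_py cysteines bonds segments out) := by unfold Spec_gen_bonds_py; infer_instance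

-- ===== CLAIM (what is proved, stated in full; the proofs are below) =====
def Claim_equal_gen_bonds_py : Prop := ∀ (cysteines : List (Int × Int)) (bonds : Int) (segments : Int), Dom_gen_bonds_py cysteines bonds segments → Spec_gen_bonds_py cysteines bonds segments (gen_bonds_py cysteines bonds segments)

-- ===== LEMMAS AND PROOFS =====

-- proof-side reference: A's recursion carrying only the connection COUNT; it is the
-- bridge between goA (count = length of the carried list) and runB (explicit stack).
def goR (segments : Int) : Nat → List (Int × Int) → Int →
    Int → List (Int × Int) → List (List (Int × Int))
  | fuel, cys, b, cnt, cb =>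
    if cnt > segments ∨ cnt + b < segments ∨ 2 * b > (cys.length : Int) then []
    else if b = 0 then [cb]
    else
      match fuel, cys with
      | _, [] => []
      | 0, _ :: _ => []
      | fuel + 1, (c, s) :: others =>
        goR segments fuel others b cnt cb ++
        others.zipIdx.flatMap (fun p =>
          goR segments fuel (others.take p.2 ++ others.drop (p.2 + 1)) (b - 1)
            (cnt + if p.1.2 ≠ s then 1 else 0)
            (cb ++ [(c, p.1.1)]))

-- the value of one frame, at its exact fuel
def nodeVal (segments : Int) (f : (List (Int × Int)) × Int × Int × List (Int × Int)) :
    List (List (Int × Int)) :=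
  goR segments (2 * f.2.1.toNat + f.1.length) f.1 f.2.1 f.2.2.1 f.2.2.2

lemma fuelF_pos (m : Nat) : 1 ≤ fuelF m := by
  cases m <;> simp [fuelF]

lemma fuelF_mono : Monotone fuelF := by
  apply monotone_nat_of_le_succ
  intro m
  have h := fuelF_pos m
  simp only [fuelF]
  nlinarith

-- a subtree that goR's guard prunes yields nothing in A
lemma goA_dead (segments : Int) : ∀ (fuel : Nat) (cys : List (Int × Int)) (b : Int)
    (sc cb : List (Int × Int)), 2 * b.toNat + cys.length ≤ fuel →
    ((sc.length : Int) > segments ∨ (sc.length : Int) + b < segments ∨ 2 * b > (cys.length : Int)) →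
    goA segments fuel cys b sc cb = [] := by
  intro fuel
  induction fuel with
  | zero =>
    intro cys b sc cb hm hP
    rw [goA.eq_def]
    dsimp only
    split_ifs with h1 h2
    · exfalso
      obtain ⟨hb, hsc⟩ := h1
      rcases hP with h | h | h <;> omega
    · rfl
    · exfalso; exact h2 (Or.inr (by omega))
  | succ m ih =>
    intro cys b sc cb hm hP
    rw [goA.eq_def]
    dsimp only
    split_ifs with h1 h2
    · exfalso
      obtain ⟨hb, hsc⟩ := h1
      rcases hP with h | h | h <;> omega
    · rfl
    · push Not at h2
      obtain ⟨hb, hlen⟩ := h2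
      obtain ⟨⟨c, s⟩, others, rfl⟩ : ∃ x others, cys = x :: others := by
        cases cys with
        | nil => simp at hlen
        | cons x others => exact ⟨x, others, rfl⟩
      simp only [List.length_cons] at hm h1 hP hlen ⊢
      rw [List.append_eq_nil_iff]
      constructor
      · exact ih others b sc cb (by omega)
          (by rcases hP with h | h | h
              · exact Or.inl h
              · exact Or.inr (Or.inl h)
              · refine Or.inr (Or.inr ?_); push_cast at h ⊢; omega)
      · rw [List.flatMap_eq_nil_iff]
        intro p hp
        have hi : p.2 < others.length := by
          have := List.snd_lt_of_mem_zipIdx hp; omega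
        have hlen' : (others.take p.2 ++ others.drop (p.2 + 1)).length = others.length - 1 := by
          simp only [List.length_append, List.length_take, List.length_drop]; omega
        have hscl : (((if p.1.2 ≠ s then sc ++ [(s, p.1.2)] else sc).length : Int)) =
            (sc.length : Int) + (if p.1.2 ≠ s then 1 else 0) := by
          split_ifs <;> simp
        refine ih _ (b - 1) _ _ (by rw [hlen']; omega) ?_
        rw [hscl, hlen']
        have ht : (0 : Int) ≤ (if p.1.2 ≠ s then (1 : Int) else 0) ∧
            (if p.1.2 ≠ s then (1 : Int) else 0) ≤ 1 := by split_ifs <;> simp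
        rcases hP with h | h | h
        · exact Or.inl (by omega)
        · exact Or.inr (Or.inl (by omega))
        · refine Or.inr (Or.inr ?_); push_cast at h ⊢; omega

-- A equals the count-carrying reference recursion
lemma goA_eq_goR (segments : Int) : ∀ (fuel : Nat) (cys : List (Int × Int)) (b : Int)
    (sc cb : List (Int × Int)), 2 * b.toNat + cys.length ≤ fuel →
    goA segments fuel cys b sc cb = goR segments fuel cys b (sc.length : Int) cb := by
  intro fuel
  induction fuel with
  | zero =>
    intro cys b sc cb hm
    have hcys : cys = [] := by cases cys <;> simp_all
    subst hcys
    rw [goA.eq_def, goR.eq_def]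
    dsimp only
    split_ifs with h1 h2 h3 <;> first | rfl | omega
  | succ m ih =>
    intro cys b sc cb hm
    by_cases hP : ((sc.length : Int) > segments ∨ (sc.length : Int) + b < segments ∨
        2 * b > (cys.length : Int))
    · rw [goA_dead segments (m + 1) cys b sc cb hm hP, goR.eq_def]
      dsimp only
      rw [if_pos hP]
    · rw [goA.eq_def, goR.eq_def]
      dsimp only
      rw [if_neg hP]
      push Not at hP
      obtain ⟨hc1, hc2, hc3⟩ := hP
      by_cases hb : b = 0
      · subst hb
        have hsc : (sc.length : Int) = segments := by omega
        rw [if_pos ⟨rfl, hsc⟩, if_pos rfl]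
      · have hb1 : 1 ≤ b := by omega
        have hlen2 : 2 ≤ cys.length := by omega
        rw [if_neg (by rintro ⟨h, -⟩; exact hb h), if_neg (by rintro (h | h); exact hb h; omega),
          if_neg hb]
        obtain ⟨⟨c, s⟩, others, rfl⟩ : ∃ x others, cys = x :: others := by
          cases cys with
          | nil => simp at hlen2
          | cons x others => exact ⟨x, others, rfl⟩
        simp only [List.length_cons] at hm
        dsimp only
        congr 1
        · exact ih others b sc cb (by omega)
        · refine List.flatMap_congr fun p hp => ?_
          have hlen' : (others.take p.2 ++ others.drop (p.2 + 1)).length ≤ others.length := by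
            simp only [List.length_append, List.length_take, List.length_drop]; omega
          rw [ih _ _ _ _ (by omega)]
          congr 1
          split_ifs <;> simp

-- goR is fuel-irrelevant above its measure: any sufficient fuel gives the frame's nodeVal
lemma goR_eq_nodeVal (segments : Int) : ∀ (fuel : Nat) (cys : List (Int × Int)) (b : Int)
    (cnt : Int) (cb : List (Int × Int)), 2 * b.toNat + cys.length ≤ fuel →
    goR segments fuel cys b cnt cb = nodeVal segments (cys, b, cnt, cb) := by
  intro fuel
  induction fuel using Nat.strong_induction_on with
  | _ fuel ih =>
    intro cys b cnt cb hm
    by_cases hP : (cnt > segments ∨ cnt + b < segments ∨ 2 * b > (cys.length : Int))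
    · rw [goR.eq_def, nodeVal, goR.eq_def]
      dsimp only
      rw [if_pos hP, if_pos hP]
    · push Not at hP
      obtain ⟨hc1, hc2, hc3⟩ := hP
      by_cases hb : b = 0
      · subst hb
        rw [goR.eq_def, nodeVal, goR.eq_def]
        dsimp only
        rw [if_neg (by push Not; exact ⟨hc1, hc2, hc3⟩), if_pos rfl,
          if_neg (by push Not; exact ⟨hc1, hc2, hc3⟩), if_pos rfl]
      · have hb1 : 1 ≤ b := by omega
        have hbt : b.toNat = (b - 1).toNat + 1 := by omega
        have hlen2 : 2 ≤ cys.length := by omega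
        obtain ⟨⟨c, s⟩, others, rfl⟩ : ∃ x others, cys = x :: others := by
          cases cys with
          | nil => simp at hlen2
          | cons x others => exact ⟨x, others, rfl⟩
        simp only [List.length_cons] at hm hc3 hlen2
        obtain ⟨f, rfl⟩ : ∃ f, fuel = f + 1 := ⟨fuel - 1, by omega⟩
        have step : ∀ g : Nat, g ≤ f → 2 * b.toNat + others.length ≤ g →
            goR segments (g + 1) ((c, s) :: others) b cnt cb =
            nodeVal segments (others, b, cnt, cb) ++
            others.zipIdx.flatMap (fun p =>
              nodeVal segments (others.take p.2 ++ others.drop (p.2 + 1), b - 1,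
                cnt + if p.1.2 ≠ s then 1 else 0, cb ++ [(c, p.1.1)])) := by
          intro g hgf hg
          rw [goR.eq_def]
          dsimp only
          rw [if_neg (by
              push Not; refine ⟨hc1, hc2, ?_⟩
              simp only [List.length_cons]; push_cast at hc3 ⊢; omega),
            if_neg hb]
          congr 1
          · exact ih g (by omega) others b cnt cb (by omega)
          · refine List.flatMap_congr fun p hp => ?_
            have hi : p.2 < others.length := by
              have := List.snd_lt_of_mem_zipIdx hp; omega
            have hlen' : (others.take p.2 ++ others.drop (p.2 + 1)).length =
                others.length - 1 := by
              simp only [List.length_append, List.length_take, List.length_drop]; omega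
            exact ih g (by omega) _ (b - 1) _ _ (by rw [hlen']; omega)
        rw [step f (by omega) (by omega)]
        have hnv : nodeVal segments ((c, s) :: others, b, cnt, cb) =
            goR segments ((2 * b.toNat + others.length) + 1) ((c, s) :: others) b cnt cb := by
          simp only [nodeVal, List.length_cons]
          have heq : 2 * b.toNat + (others.length + 1) = 2 * b.toNat + others.length + 1 := by
            omega
          rw [heq]
        rw [hnv, step (2 * b.toNat + others.length) (by omega) le_rfl]

-- the F-measure of one frame, as runB's fuel accounts it
def frameM (f : (List (Int × Int)) × Int × Int × List (Int × Int)) : Nat :=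
  2 * min f.2.1.toNat f.1.length + f.1.length

-- the stack machine computes, in order, the concatenation of its frames' values
lemma runB_spec (segments : Int) : ∀ (fuel : Nat)
    (stack : List ((List (Int × Int)) × Int × Int × List (Int × Int)))
    (racc : List (List (Int × Int))),
    (stack.map (fun f => fuelF (frameM f))).sum ≤ fuel →
    runB segments fuel stack racc =
      ((stack.map (nodeVal segments)).flatten).reverse ++ racc := by
  intro fuel
  induction fuel with
  | zero =>
    intro stack racc h
    cases stack with
    | nil => rfl
    | cons f rest =>
      exfalso
      simp only [List.map_cons, List.sum_cons] at h
      have := fuelF_pos (frameM f)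
      omega
  | succ fuel ih =>
    intro stack racc h
    cases stack with
    | nil => rfl
    | cons fr rest =>
      obtain ⟨cys, b, cnt, cb⟩ := fr
      simp only [List.map_cons, List.sum_cons] at h
      have hpos := fuelF_pos (frameM (cys, b, cnt, cb))
      rw [runB.eq_def]
      dsimp only
      split_ifs with h1 h2
      · -- pruned frame: nodeVal is []
        rw [ih rest racc (by omega)]
        have : nodeVal segments (cys, b, cnt, cb) = [] := by
          rw [nodeVal, goR.eq_def]; dsimp only; rw [if_pos h1]
        simp [this]
      · -- b = 0, emit cb
        subst h2
        rw [ih rest (cb :: racc) (by omega)]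
        have : nodeVal segments (cys, 0, cnt, cb) = [cb] := by
          rw [nodeVal, goR.eq_def]; dsimp only
          rw [if_neg h1, if_pos rfl]
        simp [this]
      · push Not at h1
        obtain ⟨hc1, hc2, hc3⟩ := h1
        have hb1 : 1 ≤ b := by omega
        have hlen2 : 2 ≤ cys.length := by omega
        obtain ⟨⟨c, s⟩, others, rfl⟩ : ∃ x others, cys = x :: others := by
          cases cys with
          | nil => simp at hlen2
          | cons x others => exact ⟨x, others, rfl⟩
        simp only [List.length_cons] at hlen2 hc3
        have hbn : b.toNat ≤ others.length := by push_cast at hc3; omega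
        have hM : frameM ((c, s) :: others, b, cnt, cb) =
            2 * b.toNat + (others.length + 1) := by
          simp only [frameM, List.length_cons]
          congr 2
          omega
        set children := ((others, b, cnt, cb) ::
          others.zipIdx.map (fun p =>
            (others.take p.2 ++ others.drop (p.2 + 1), b - 1,
             cnt + (if p.1.2 ≠ s then 1 else 0), cb ++ [(c, p.1.1)]))) with hch
        -- fuel accounting for the pushed children
        have hchsum : (children.map (fun f => fuelF (frameM f))).sum + 1 ≤
            fuelF (frameM ((c, s) :: others, b, cnt, cb)) := by
          rw [hM]
          have hskip : frameM (others, b, cnt, cb) = 2 * b.toNat + others.length := by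
            simp only [frameM]
            congr 2
            omega
          have m0 : Nat := 0
          rw [hch]
          simp only [List.map_cons, List.sum_cons, List.map_map]
          have hpair : ∀ x ∈ others.zipIdx.map
              ((fun f => fuelF (frameM f)) ∘ (fun p =>
                (others.take p.2 ++ others.drop (p.2 + 1), b - 1,
                 cnt + (if p.1.2 ≠ s then 1 else 0), cb ++ [(c, p.1.1)]))),
              x ≤ fuelF (2 * b.toNat + others.length) := by
            intro x hx
            simp only [List.mem_map, Function.comp] at hx
            obtain ⟨p, hp, rfl⟩ := hx
            have hi : p.2 < others.length := by
              have := List.snd_lt_of_mem_zipIdx hp; omega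
            have hlen' : (others.take p.2 ++ others.drop (p.2 + 1)).length =
                others.length - 1 := by
              simp only [List.length_append, List.length_take, List.length_drop]; omega
            apply fuelF_mono
            simp only [frameM, hlen']
            have : (b - 1).toNat ≤ b.toNat := by omega
            have : min (b - 1).toNat (others.length - 1) ≤ b.toNat := by omega
            omega
          have hb2 := List.sum_le_card_nsmul _ _ hpair
          simp only [List.length_map, List.length_zipIdx, smul_eq_mul] at hb2
          have hF : fuelF (2 * b.toNat + (others.length + 1)) =
              1 + (2 * b.toNat + others.length + 1) * fuelF (2 * b.toNat + others.length) := by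
            have : 2 * b.toNat + (others.length + 1) = (2 * b.toNat + others.length) + 1 := by
              omega
            rw [this, fuelF]
          rw [hskip, hF]
          have hol : others.length ≤ 2 * b.toNat + others.length := by omega
          calc fuelF (2 * b.toNat + others.length) +
                (List.map _ others.zipIdx).sum + 1
              ≤ fuelF (2 * b.toNat + others.length) +
                others.length * fuelF (2 * b.toNat + others.length) + 1 := by omega
            _ ≤ 1 + (2 * b.toNat + others.length + 1) * fuelF (2 * b.toNat + others.length) := by
                nlinarith [fuelF_pos (2 * b.toNat + others.length)]
        dsimp only
        rw [← hch]
        rw [ih (children ++ rest) racc (by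
          rw [List.map_append, List.sum_append]
          omega)]
        -- the children's concatenated values are the parent frame's nodeVal
        have hmeq : 2 * b.toNat + (others.length + 1) = (2 * b.toNat + others.length) + 1 := by
          omega
        have hpar : nodeVal segments ((c, s) :: others, b, cnt, cb) =
            nodeVal segments (others, b, cnt, cb) ++
            others.zipIdx.flatMap (fun p =>
              nodeVal segments (others.take p.2 ++ others.drop (p.2 + 1), b - 1,
                cnt + if p.1.2 ≠ s then 1 else 0, cb ++ [(c, p.1.1)])) := by
          rw [nodeVal]
          dsimp only [List.length_cons]
          rw [hmeq, goR.eq_def]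
          dsimp only
          rw [if_neg (by
              push Not; refine ⟨hc1, hc2, ?_⟩
              simp only [List.length_cons]; push_cast at hc3 ⊢; omega), if_neg (by omega)]
          congr 1
          refine List.flatMap_congr fun p hp => ?_
          have hi : p.2 < others.length := by
            have := List.snd_lt_of_mem_zipIdx hp; omega
          have hlen' : (others.take p.2 ++ others.drop (p.2 + 1)).length = others.length - 1 := by
            simp only [List.length_append, List.length_take, List.length_drop]; omega
          exact goR_eq_nodeVal segments _ _ (b - 1) _ _ (by rw [hlen']; omega)
        rw [hch]
        simp only [List.map_append, List.map_cons, List.flatten_append, List.flatten_cons,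
          List.map_map, Function.comp_def, ← List.flatMap_def, ← hpar]

-- ===== VERDICT (by name: the statement is the Claim_ definition above) =====
theorem gen_bonds_py_spec : Claim_equal_gen_bonds_py := by
  intro cysteines bonds segments _
  unfold Spec_gen_bonds_py gen_bonds_py gen_bonds_py_alt
  rw [goA_eq_goR segments _ cysteines bonds [] [] le_rfl]
  simp only [List.length_nil, Nat.cast_zero]
  rw [goR_eq_nodeVal segments _ cysteines bonds 0 [] le_rfl]
  rw [runB_spec segments _ [(cysteines, bonds, 0, [])] [] (by
    simp only [List.map_cons, List.map_nil, List.sum_cons, List.sum_nil, frameM]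
    omega)]
  simp
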